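-- pv_equiv track=rewrite | github.com/SKYtp/Object-Oriented-Data-Structures | lab_c10_i5_0792.py | minWeight
-- ===== SOURCE A (Python) =====
-- def minWeight(lists, box):
--     min_Weight = 99999999
--
--     if box == 1:
--         return sum(lists)
--
--     for i in range(len(lists)):
--         if len(lists[i:]) < box - 1:
--             break
--
--         thisBox = sum(lists[:i])
--         otherBox = minWeight(lists[i:], box - 1)
--         min_Weight = min(max(thisBox, otherBox), min_Weight)
--
--     return min_Weight
-- ===== SOURCE B (Python) =====
-- # Bottom-up DP over (start index, boxes) with prefix sums instead of A's exponential recursion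
-- # (intended as faster; probe: A times out where B answers instantly); same 99999999 sentinel as A.
-- def minWeight(lists, box):
--     INF = 99999999
--     if box == 1:
--         return sum(lists)
--     n = len(lists)
--     if box > n + 1:
--         return INF  # even the first split point is infeasible: A breaks at i=0 and returns the sentinel
--     # prefix sums: P[k] = sum(lists[:k])
--     P = [0]
--     acc = 0
--     for x in lists:
--         acc += x
--         P.append(acc)
--     # dp[s] = minWeight(lists[s:], 1)
--     dp = [P[n] - P[s] for s in range(n + 1)]
--     for b in range(2, box + 1):
--         ndp = []
--         for s in range(n + 1):
--             best = INF
--             for i in range(n - s):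
--                 if n - s - i < b - 1:
--                     break
--                 best = min(max(P[s + i] - P[s], dp[s + i]), best)
--             ndp.append(best)
--         dp = ndp
--     return dp[0]
-- ===== Notes on version B (the rewrite author's own statement) =====
-- stated objective: faster
-- what changed: Replaces A's exponential recursion over suffixes with a bottom-up dynamic program over (start index, number of boxes) using precomputed prefix sums, keeping A's 99999999 sentinel as the DP's infinity; intended as faster (probe measured B 28.85x at the largest size where A finished, A timed out on larger inputs).
-- outside the precondition, e.g. on minWeight([], 0): A returns 99999999, B returns 0; on minWeight([1], 0): A raises RecursionError, B returns 1
import Mathlib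
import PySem

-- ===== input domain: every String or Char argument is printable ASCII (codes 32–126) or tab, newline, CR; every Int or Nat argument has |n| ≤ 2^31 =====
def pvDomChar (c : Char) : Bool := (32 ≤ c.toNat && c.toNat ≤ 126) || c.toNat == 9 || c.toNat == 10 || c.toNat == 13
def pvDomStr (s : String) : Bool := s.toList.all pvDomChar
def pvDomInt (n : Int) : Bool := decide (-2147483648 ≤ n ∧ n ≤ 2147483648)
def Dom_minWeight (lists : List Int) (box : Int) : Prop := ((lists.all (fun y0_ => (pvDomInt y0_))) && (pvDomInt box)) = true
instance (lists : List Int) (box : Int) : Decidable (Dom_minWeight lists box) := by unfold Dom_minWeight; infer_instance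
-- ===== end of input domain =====

-- B replaces A's exponential recursion by a bottom-up DP over (start index, boxes) with prefix sums;
-- intended as faster (timing run measured B 28.85x at the largest size where A finished; A timed out above).

-- ===== PORT A =====
-- Recursion on the (nonnegative) number of boxes; the `for i in range(len(lists))` loop with
-- its `break` is the foldl below: the break condition `len(lists[i:]) < box - 1` is monotone
-- in i, so skipping each i on which it holds yields the same accumulator as breaking.
-- The 0 case corresponds to box ≤ 0, where the Python loop either diverges (nonempty list,
-- excluded by Pre_) or returns the 99999999 sentinel (empty list).
def minWeightGo : Nat → List Int → Int
  | 0, _ => 99999999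
  | 1, l => l.sum
  | (b+2), l =>
    (List.range l.length).foldl
      (fun acc i =>
        if l.length - i < b + 1 then acc
        else min (max ((l.take i).sum) (minWeightGo (b+1) (l.drop i))) acc)
      99999999

def minWeight (lists : List Int) (box : Int) : Int :=
  minWeightGo box.toNat lists

-- ===== PORT B =====
-- prefix sums: `P = [0]; acc = 0; for x in lists: acc += x; P.append(acc)`
def bPrefix (lists : List Int) : List Int :=
  (lists.foldl (fun pa x => (pa.1 ++ [pa.2 + x], pa.2 + x)) (([0] : List Int), (0 : Int))).1

-- inner loop: `best = INF; for i in range(n-s): if n-s-i < b-1: break; best = min(..., best)`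
def bInner (P dp : List Int) (n s b : Nat) : Int :=
  (List.range (n - s)).foldl
    (fun best i =>
      if n - s - i < b - 1 then best
      else min (max (P.getD (s+i) 0 - P.getD s 0) (dp.getD (s+i) 0)) best)
    99999999

def minWeight_alt (lists : List Int) (box : Int) : Int :=
  if box == 1 then lists.sum
  else
    let n := lists.length
    if (n : Int) + 1 < box then 99999999
    else
      let P := bPrefix lists
      let dp0 := (List.range (n+1)).map (fun s => P.getD n 0 - P.getD s 0)
      let dpf := (List.range' 2 (box.toNat - 1)).foldl
        (fun dp b => (List.range (n+1)).map (fun s => bInner P dp n s b)) dp0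
      dpf.getD 0 0

-- ===== PRECONDITION & SPEC =====
-- Pre_ restricts to the natural domain box ≥ 1: for box ≤ 0 the Python A recurses forever
-- (RecursionError) on every nonempty list, and on the empty list returns its 99999999
-- sentinel, an accident of the unreachable-count corner which B does not reproduce.
def Pre_minWeight (lists : List Int) (box : Int) : Prop := 1 ≤ box
instance (lists : List Int) (box : Int) : Decidable (Pre_minWeight lists box) := by unfold Pre_minWeight; infer_instance

def pvWitness_minWeight : List Int × Int := ([1, 2, 3, 4], 2)

def Spec_minWeight (lists : List Int) (box : Int) (out : Int) : Prop := out = minWeight_alt lists box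
instance (lists : List Int) (box : Int) (out : Int) : Decidable (Spec_minWeight lists box out) := by unfold Spec_minWeight; infer_instance

-- ===== CLAIM (what is proved, stated in full; the proofs are below) =====
def Claim_equal_minWeight : Prop := ∀ (lists : List Int) (box : Int), Dom_minWeight lists box → Pre_minWeight lists box → Spec_minWeight lists box (minWeight lists box)

-- ===== LEMMAS AND PROOFS =====

-- the prefix-sum builder computes [sum(lists[:k]) for k in range(n+1)]
theorem bPrefix_foldl (l : List Int) : ∀ (P : List Int) (a : Int),
    (l.foldl (fun pa x => (pa.1 ++ [pa.2 + x], pa.2 + x)) (P, a)).1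
      = P ++ (List.range l.length).map (fun k => a + (l.take (k+1)).sum) := by
  induction l with
  | nil => intro P a; simp
  | cons x t ih =>
      intro P a
      simp only [List.foldl_cons]
      rw [ih]
      simp [List.length_cons, List.range_succ_eq_map, List.append_assoc,
        Function.comp, add_assoc]

theorem bPrefix_eq (l : List Int) :
    bPrefix l = (List.range (l.length + 1)).map (fun k => (l.take k).sum) := by
  unfold bPrefix
  rw [bPrefix_foldl]
  simp [List.range_succ_eq_map, Function.comp]

theorem getD_map_range (g : Nat → Int) (m k : Nat) (h : k < m) :
    ((List.range m).map g).getD k 0 = g k := by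
  simp [List.getD_eq_getElem?_getD, h]

theorem seg_sum (l : List Int) (s i : Nat) :
    ((l.drop s).take i).sum = (l.take (s+i)).sum - (l.take s).sum := by
  have : l.take (s+i) = l.take s ++ (l.drop s).take i := List.take_add ..
  rw [this, List.sum_append]; ring

-- one DP level computes A's recursion at that level
theorem bInner_eq (l : List Int) (b' s : Nat) (hs : s ≤ l.length) :
    bInner (bPrefix l)
      ((List.range (l.length+1)).map (fun s' => minWeightGo (b'+1) (l.drop s')))
      l.length s (b'+2)
    = minWeightGo (b'+2) (l.drop s) := by
  unfold bInner
  rw [show minWeightGo (b'+2) (l.drop s) =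
      (List.range (l.drop s).length).foldl
        (fun acc i =>
          if (l.drop s).length - i < b' + 1 then acc
          else min (max (((l.drop s).take i).sum) (minWeightGo (b'+1) ((l.drop s).drop i))) acc)
        99999999 from rfl]
  rw [List.length_drop]
  apply PySem.List.foldl_congr_mem
  intro acc i hi
  rw [List.mem_range] at hi
  have hsi : s + i < l.length := by omega
  have h1 : (bPrefix l).getD (s+i) 0 = (l.take (s+i)).sum := by
    rw [bPrefix_eq]; exact getD_map_range _ _ _ (by omega)
  have h2 : (bPrefix l).getD s 0 = (l.take s).sum := by
    rw [bPrefix_eq]; exact getD_map_range _ _ _ (by omega)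
  have h3 : ((List.range (l.length+1)).map (fun s' => minWeightGo (b'+1) (l.drop s'))).getD (s+i) 0
      = minWeightGo (b'+1) (l.drop (s+i)) := getD_map_range _ _ _ (by omega)
  rw [h1, h2, h3, ← seg_sum, List.drop_drop]
  rfl

-- iterating the DP levels
theorem bIter (l : List Int) : ∀ (cnt b0 : Nat), 2 ≤ b0 →
    (List.range' b0 cnt).foldl
        (fun dp b => (List.range (l.length+1)).map (fun s => bInner (bPrefix l) dp l.length s b))
        ((List.range (l.length+1)).map (fun s => minWeightGo (b0-1) (l.drop s)))
      = (List.range (l.length+1)).map (fun s => minWeightGo (b0-1+cnt) (l.drop s)) := by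
  intro cnt
  induction cnt with
  | zero => intro b0 _; simp
  | succ c ih =>
      intro b0 hb0
      rw [List.range'_succ, List.foldl_cons]
      obtain ⟨b', rfl⟩ : ∃ b', b0 = b' + 2 := ⟨b0 - 2, by omega⟩
      have hstep : (List.range (l.length+1)).map
            (fun s => bInner (bPrefix l)
              ((List.range (l.length+1)).map (fun s' => minWeightGo (b'+2-1) (l.drop s')))
              l.length s (b'+2))
          = (List.range (l.length+1)).map (fun s => minWeightGo (b'+2+1-1) (l.drop s)) := by
        apply List.map_congr_left
        intro s hs
        rw [List.mem_range] at hs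
        have := bInner_eq l b' s (by omega)
        simpa using this
      rw [hstep]
      have := ih (b'+2+1) (by omega)
      rw [this, show b'+2+1-1+c = b'+2-1+(c+1) from by omega]

-- A skips every loop index when box > len(lists) + 1
theorem goBig (l : List Int) (b' : Nat) (h : l.length < b' + 1) :
    minWeightGo (b'+2) l = 99999999 := by
  rw [show minWeightGo (b'+2) l =
      (List.range l.length).foldl
        (fun acc i =>
          if l.length - i < b' + 1 then acc
          else min (max ((l.take i).sum) (minWeightGo (b'+1) (l.drop i))) acc)
        99999999 from rfl]
  rw [PySem.List.foldl_congr_mem (g := fun acc _ => acc)]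
  · exact List.foldl_fixed ..
  · intro acc i hi
    rw [List.mem_range] at hi
    rw [if_pos (by omega)]

-- ===== VERDICT (by name: the statement is the Claim_ definition above) =====
theorem minWeight_spec : Claim_equal_minWeight := by
  intro lists box _ hpre
  unfold Spec_minWeight minWeight minWeight_alt Pre_minWeight at *
  by_cases h1 : box = 1
  · subst h1; simp [minWeightGo]
  · have hb2 : 2 ≤ box := by omega
    have hbeq : (box == 1) = false := by simp; omega
    rw [hbeq]
    simp only [Bool.false_eq_true, if_false]
    obtain ⟨b', hb'⟩ : ∃ b', box.toNat = b' + 2 := ⟨box.toNat - 2, by omega⟩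
    by_cases hbig : (lists.length : Int) + 1 < box
    · rw [if_pos hbig, hb']
      exact goBig _ _ (by omega)
    · rw [if_neg hbig]
      have hdp0 : (List.range (lists.length+1)).map
            (fun s => (bPrefix lists).getD lists.length 0 - (bPrefix lists).getD s 0)
          = (List.range (lists.length+1)).map (fun s => minWeightGo (2-1) (lists.drop s)) := by
        apply List.map_congr_left
        intro s hs
        rw [List.mem_range] at hs
        rw [bPrefix_eq, getD_map_range _ _ _ (by omega), getD_map_range _ _ _ (by omega)]
        show (List.take lists.length lists).sum - (List.take s lists).sum = (lists.drop s).sum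
        rw [List.take_length]
        have hsum : lists.sum = (lists.take s).sum + (lists.drop s).sum := by
          conv_lhs => rw [← List.take_append_drop s lists]
          rw [List.sum_append]
        omega
      rw [hdp0, bIter lists (box.toNat - 1) 2 (le_refl 2)]
      rw [getD_map_range _ _ 0 (by omega)]
      rw [List.drop_zero]
      congr 1
      omega
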